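-- pv_equiv track=rewrite | github.com/pypi-data/pypi-mirror-395 | packages/intervalop/intervalop-0.0.1-py3-none-any.whl/intervalop/interval.py | excludingco
-- ===== SOURCE A (Python) =====
-- def is_intersectingco(A, B):
--     """
--     A = [a, b]
--     B = [c, d]
--     """
--     output = False
--     master = [A, B]
--     master.sort(key=lambda sublist: sublist[0])
--     if master[1][0] < master[0][1]:
--         output = True
--     return output
--
-- def excludingco(A, B):
--     """
--     A = [[a, b], [c, d]]
--     B = [[e, f], [g, h]]
--     """
--     output = []
--     for I in A:
--         remove = False
--         for J in B:
--             if is_intersectingco(I, J):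
--                 remove = True
--         if not remove:
--             output.append(I)
--     return output
-- ===== SOURCE B (Python) =====
-- def _bisect_left(s, x):
--     lo, hi = 0, len(s)
--     while lo < hi:
--         mid = (lo + hi) // 2
--         if s[mid] < x:
--             lo = mid + 1
--         else:
--             hi = mid
--     return lo
--
-- def _bisect_right(s, x):
--     lo, hi = 0, len(s)
--     while lo < hi:
--         mid = (lo + hi) // 2
--         if x < s[mid]:
--             hi = mid
--         else:
--             lo = mid + 1
--     return lo
--
-- def excludingco(A, B):
--     if not B:
--         return list(A)
--     starts = sorted(J[0] for J in B)
--     ne_starts = sorted(J[0] for J in B if J[0] < J[1])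
--     ne_ends = sorted(J[1] for J in B if J[0] < J[1])
--     output = []
--     for I in A:
--         a, b = I[0], I[1]
--         # overlap iff some B-start lies in [a, b), or a lies strictly
--         # inside some non-empty B interval (#{c < a} > #{d <= a}).
--         if _bisect_left(starts, a) < _bisect_left(starts, b):
--             continue
--         if _bisect_right(ne_ends, a) < _bisect_left(ne_starts, a):
--             continue
--         output.append(I)
--     return output
-- ===== Notes on version B (the rewrite author's own statement) =====
-- stated objective: faster
-- what changed: A tests every interval of A against every interval of B with a two-element sort per pair; B pre-sorts B's start points and the start/end points of B's non-empty intervals once and decides each interval of A by binary searches (a start of B in [a,b), or a strictly covered, detected by comparing counts).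
-- outside the precondition, e.g. on excludingco([[1, 2]], [[5]]): A returns [[1, 2]], B raises IndexError; on excludingco([[1]], [[0, 5]]): A returns [], B raises IndexError
import Mathlib
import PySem

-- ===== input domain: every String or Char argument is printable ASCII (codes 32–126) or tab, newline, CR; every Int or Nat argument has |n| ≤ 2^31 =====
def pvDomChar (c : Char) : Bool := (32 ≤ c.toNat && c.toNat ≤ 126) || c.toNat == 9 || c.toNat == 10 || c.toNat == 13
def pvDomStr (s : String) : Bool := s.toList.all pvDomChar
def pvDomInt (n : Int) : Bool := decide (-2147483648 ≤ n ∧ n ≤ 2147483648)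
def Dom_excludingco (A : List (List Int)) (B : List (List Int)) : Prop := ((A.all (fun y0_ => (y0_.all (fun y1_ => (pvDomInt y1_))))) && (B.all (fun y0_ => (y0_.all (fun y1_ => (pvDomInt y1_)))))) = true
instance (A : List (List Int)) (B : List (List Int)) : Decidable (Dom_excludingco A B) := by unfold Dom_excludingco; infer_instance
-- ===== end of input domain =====

-- B replaces A's O(|A|*|B|) pairwise overlap scan by sorted start/end arrays of B
-- queried with binary search (O((|A|+|B|) log |B|)); equivalence of RETURN values.

-- ===== PORT A =====
def is_intersectingco (I J : List Int) : Bool :=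
  let master := PySem.List.sorted [I, J] (fun sublist => PySem.List.pyGetD sublist 0 0)
  if PySem.List.pyGetD (PySem.List.pyGetD master 1 []) 0 0 <
      PySem.List.pyGetD (PySem.List.pyGetD master 0 []) 1 0 then
    true
  else
    false

def excludingco (A : List (List Int)) (B : List (List Int)) : List (List Int) :=
  A.foldl (fun output I =>
    let remove := B.foldl (fun remove J => if is_intersectingco I J then true else remove) false
    if !remove then output ++ [I] else output) []

-- ===== PORT B =====
def excludingco_alt (A : List (List Int)) (B : List (List Int)) : List (List Int) :=
  if B = [] then A
  else
    let starts := PySem.List.sorted (B.map (fun J => PySem.List.pyGetD J 0 0)) id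
    let ne := B.filter (fun J => PySem.List.pyGetD J 0 0 < PySem.List.pyGetD J 1 0)
    let neStarts := PySem.List.sorted (ne.map (fun J => PySem.List.pyGetD J 0 0)) id
    let neEnds := PySem.List.sorted (ne.map (fun J => PySem.List.pyGetD J 1 0)) id
    A.foldl (fun output I =>
      let a := PySem.List.pyGetD I 0 0
      let b := PySem.List.pyGetD I 1 0
      if PySem.List.bisectLeft starts a < PySem.List.bisectLeft starts b then output
      else if PySem.List.bisectRight neEnds a < PySem.List.bisectLeft neStarts a then output
      else output ++ [I]) []

-- ===== PRECONDITION & SPEC =====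
-- Pre_ excludes malformed intervals (fewer than 2 endpoints): Python A raises IndexError on
-- almost all of them (and on the remaining value-dependent corners where A happens to return,
-- the natural B raises IndexError), except that with B empty A never inspects the intervals of
-- A at all, which Pre_ keeps.
def Pre_excludingco (A : List (List Int)) (B : List (List Int)) : Prop :=
  (∀ J ∈ B, 2 ≤ J.length) ∧ (B = [] ∨ ∀ I ∈ A, 2 ≤ I.length)
instance (A : List (List Int)) (B : List (List Int)) : Decidable (Pre_excludingco A B) := by
  unfold Pre_excludingco; infer_instance

def pvWitness_excludingco : List (List Int) × List (List Int) :=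
  ([[0, 1], [5, 9]], [[2, 4]])

def Spec_excludingco (A : List (List Int)) (B : List (List Int)) (out : List (List Int)) : Prop := out = excludingco_alt A B
instance (A : List (List Int)) (B : List (List Int)) (out : List (List Int)) : Decidable (Spec_excludingco A B out) := by unfold Spec_excludingco; infer_instance

-- ===== CLAIM (what is proved, stated in full; the proofs are below) =====
def Claim_equal_excludingco : Prop := ∀ (A : List (List Int)) (B : List (List Int)), Dom_excludingco A B → Pre_excludingco A B → Spec_excludingco A B (excludingco A B)

-- ===== LEMMAS AND PROOFS =====

-- sorting a two-element list is one stable comparison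
lemma sorted_pair (I J : List Int) :
    PySem.List.sorted [I, J] (fun sublist => PySem.List.pyGetD sublist 0 0) =
      if PySem.List.pyGetD J 0 0 < PySem.List.pyGetD I 0 0 then [J, I] else [I, J] := by
  simp [PySem.List.sorted, PySem.List.insertBy]

-- A's overlap test, written out on the four endpoints
lemma is_inter_eq (I J : List Int) :
    is_intersectingco I J =
      decide ((PySem.List.pyGetD J 0 0 < PySem.List.pyGetD I 0 0 ∧
               PySem.List.pyGetD I 0 0 < PySem.List.pyGetD J 1 0) ∨
              (PySem.List.pyGetD I 0 0 ≤ PySem.List.pyGetD J 0 0 ∧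
               PySem.List.pyGetD J 0 0 < PySem.List.pyGetD I 1 0)) := by
  unfold is_intersectingco
  rw [sorted_pair]
  by_cases h : PySem.List.pyGetD J 0 0 < PySem.List.pyGetD I 0 0
  · rw [if_pos h]
    show (if PySem.List.pyGetD I 0 0 < PySem.List.pyGetD J 1 0 then true else false) = _
    split_ifs with h2 <;> simp <;> omega
  · rw [if_neg h]
    show (if PySem.List.pyGetD J 0 0 < PySem.List.pyGetD I 1 0 then true else false) = _
    split_ifs with h2 <;> simp <;> omega

-- A's inner loop is List.any
lemma foldl_or_any (B : List (List Int)) (I : List Int) (init : Bool) :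
    B.foldl (fun remove J => if is_intersectingco I J then true else remove) init
      = (init || B.any (fun J => is_intersectingco I J)) := by
  induction B generalizing init with
  | nil => simp
  | cons J B ih =>
    rw [List.foldl_cons, ih, List.any_cons]
    cases h : is_intersectingco I J
    · simp
    · simp

-- A is a filter over A's intervals
lemma excludingco_eq_filter (A B : List (List Int)) :
    excludingco A B = A.filter (fun I => !(B.any (fun J => is_intersectingco I J))) := by
  unfold excludingco
  have hbody : (fun (output : List (List Int)) (I : List Int) =>
      let remove := B.foldl (fun remove J => if is_intersectingco I J then true else remove) false
      if !remove then output ++ [I] else output)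
      = fun output I =>
        if (!(B.any (fun J => is_intersectingco I J))) then output ++ [I] else output := by
    funext output I
    simp only [foldl_or_any, Bool.false_or]
  have hfoldl := PySem.List.foldl_append_if (fun I => !(B.any (fun J => is_intersectingco I J)))
    (id : List Int → List Int) A []
  simp only [id_eq, List.map_id, List.nil_append] at hfoldl
  rw [hbody, hfoldl]

-- B is a filter over A's intervals (for B ≠ [])
lemma excludingco_alt_eq_filter (A B : List (List Int)) (hB : B ≠ []) :
    excludingco_alt A B =
      A.filter (fun I =>
        !(decide (PySem.List.bisectLeft (PySem.List.sorted (B.map (fun J => PySem.List.pyGetD J 0 0)) id) (PySem.List.pyGetD I 0 0) <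
            PySem.List.bisectLeft (PySem.List.sorted (B.map (fun J => PySem.List.pyGetD J 0 0)) id) (PySem.List.pyGetD I 1 0)) ||
          decide (PySem.List.bisectRight (PySem.List.sorted ((B.filter (fun J => PySem.List.pyGetD J 0 0 < PySem.List.pyGetD J 1 0)).map (fun J => PySem.List.pyGetD J 1 0)) id) (PySem.List.pyGetD I 0 0) <
            PySem.List.bisectLeft (PySem.List.sorted ((B.filter (fun J => PySem.List.pyGetD J 0 0 < PySem.List.pyGetD J 1 0)).map (fun J => PySem.List.pyGetD J 0 0)) id) (PySem.List.pyGetD I 0 0)))) := by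
  unfold excludingco_alt
  rw [if_neg hB]
  have hbody : ∀ (p q : List Int → Prop) [DecidablePred p] [DecidablePred q],
      (fun (output : List (List Int)) (I : List Int) =>
        if p I then output else if q I then output else output ++ [I])
      = fun output I => if (!(decide (p I) || decide (q I))) then output ++ [I] else output := by
    intro p q _ _
    funext output I
    by_cases hp : p I <;> by_cases hq : q I <;> simp [hp, hq]
  simp only [hbody]
  have hfoldl := PySem.List.foldl_append_if
    (fun I =>
      !(decide (PySem.List.bisectLeft (PySem.List.sorted (B.map (fun J => PySem.List.pyGetD J 0 0)) id) (PySem.List.pyGetD I 0 0) <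
          PySem.List.bisectLeft (PySem.List.sorted (B.map (fun J => PySem.List.pyGetD J 0 0)) id) (PySem.List.pyGetD I 1 0)) ||
        decide (PySem.List.bisectRight (PySem.List.sorted ((B.filter (fun J => PySem.List.pyGetD J 0 0 < PySem.List.pyGetD J 1 0)).map (fun J => PySem.List.pyGetD J 1 0)) id) (PySem.List.pyGetD I 0 0) <
          PySem.List.bisectLeft (PySem.List.sorted ((B.filter (fun J => PySem.List.pyGetD J 0 0 < PySem.List.pyGetD J 1 0)).map (fun J => PySem.List.pyGetD J 0 0)) id) (PySem.List.pyGetD I 0 0))))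
    (id : List Int → List Int) A []
  simp only [id_eq, List.map_id, List.nil_append] at hfoldl
  rw [hfoldl]

-- on a sorted list, bisect_left counts the elements < x
lemma bisectLeft_countP (ys : List Int) (x : Int) (h : List.Pairwise (· ≤ ·) ys) :
    PySem.List.bisectLeft ys x = ys.countP (fun s => decide (s < x)) := by
  obtain ⟨hle, hlt, hge⟩ := PySem.List.bisectLeft_spec ys x h
  set r := PySem.List.bisectLeft ys x with hr
  have : ys.countP (fun s => decide (s < x)) =
      (ys.take r).countP (fun s => decide (s < x)) + (ys.drop r).countP (fun s => decide (s < x)) := by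
    rw [← List.countP_append, List.take_append_drop]
  rw [this]
  have h1 : (ys.take r).countP (fun s => decide (s < x)) = (ys.take r).length := by
    rw [List.countP_eq_length]
    intro a ha
    obtain ⟨j, hj, rfl⟩ := List.mem_iff_getElem.mp ha
    rw [List.getElem_take]
    have hjlen : j < ys.length := lt_of_lt_of_le (lt_of_lt_of_le hj (by simp)) (le_refl _)
    exact decide_eq_true (hlt j (by simpa using hjlen) (by simp at hj; omega))
  have h2 : (ys.drop r).countP (fun s => decide (s < x)) = 0 := by
    rw [List.countP_eq_zero]
    intro a ha
    obtain ⟨j, hj, rfl⟩ := List.mem_iff_getElem.mp ha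
    rw [List.getElem_drop]
    have := hge (r + j) (by simp at hj; omega) (by omega)
    simp only [decide_eq_true_eq]
    omega
  rw [h1, h2, List.length_take]
  omega

-- on a sorted list, bisect_right counts the elements ≤ x
lemma bisectRight_countP (ys : List Int) (x : Int) (h : List.Pairwise (· ≤ ·) ys) :
    PySem.List.bisectRight ys x = ys.countP (fun s => decide (s ≤ x)) := by
  obtain ⟨hle, hlt, hge⟩ := PySem.List.bisectRight_spec ys x h
  set r := PySem.List.bisectRight ys x with hr
  have : ys.countP (fun s => decide (s ≤ x)) =
      (ys.take r).countP (fun s => decide (s ≤ x)) + (ys.drop r).countP (fun s => decide (s ≤ x)) := by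
    rw [← List.countP_append, List.take_append_drop]
  rw [this]
  have h1 : (ys.take r).countP (fun s => decide (s ≤ x)) = (ys.take r).length := by
    rw [List.countP_eq_length]
    intro a ha
    obtain ⟨j, hj, rfl⟩ := List.mem_iff_getElem.mp ha
    rw [List.getElem_take]
    have hjlen : j < ys.length := lt_of_lt_of_le (lt_of_lt_of_le hj (by simp)) (le_refl _)
    exact decide_eq_true (hlt j (by simpa using hjlen) (by simp at hj; omega))
  have h2 : (ys.drop r).countP (fun s => decide (s ≤ x)) = 0 := by
    rw [List.countP_eq_zero]
    intro a ha
    obtain ⟨j, hj, rfl⟩ := List.mem_iff_getElem.mp ha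
    rw [List.getElem_drop]
    have := hge (r + j) (by simp at hj; omega) (by omega)
    simp only [decide_eq_true_eq]
    omega
  rw [h1, h2, List.length_take]
  omega

-- a strict count comparison is a witness, when p implies q pointwise
lemma countP_lt_countP_iff {α : Type} (l : List α) (p q : α → Bool)
    (hpq : ∀ x ∈ l, p x = true → q x = true) :
    (l.countP p < l.countP q ↔ ∃ x ∈ l, q x = true ∧ p x = false) := by
  induction l with
  | nil => simp
  | cons y l ih =>
    have hpq' : ∀ x ∈ l, p x = true → q x = true := fun x hx => hpq x (List.mem_cons_of_mem _ hx)
    have hmono : l.countP p ≤ l.countP q := List.countP_mono_left hpq'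
    rw [List.countP_cons, List.countP_cons]
    have hex : (∃ x ∈ y :: l, q x = true ∧ p x = false) ↔
        ((q y = true ∧ p y = false) ∨ ∃ x ∈ l, q x = true ∧ p x = false) := by
      constructor
      · rintro ⟨x, hx, hqp⟩
        rcases List.mem_cons.mp hx with rfl | hx
        · exact Or.inl hqp
        · exact Or.inr ⟨x, hx, hqp⟩
      · rintro (hqp | ⟨x, hx, hqp⟩)
        · exact ⟨y, List.mem_cons_self, hqp⟩
        · exact ⟨x, List.mem_cons_of_mem _ hx, hqp⟩
    rw [hex]
    by_cases hp : p y = true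
    · have hq := hpq y List.mem_cons_self hp
      rw [if_pos hp, if_pos hq, ← ih hpq']
      simp [hp]
    · have hpf : p y = false := by revert hp; cases p y <;> simp
      by_cases hq : q y = true
      · rw [if_neg hp, if_pos hq]
        simp only [hq, hpf, and_self, true_or, iff_true]
        omega
      · rw [if_neg hp, if_neg hq, Nat.add_zero, Nat.add_zero, ih hpq']
        simp [hq]

-- bisect on the sorted copy = countP on the original
lemma bisectLeft_sorted_countP (l : List Int) (x : Int) :
    PySem.List.bisectLeft (PySem.List.sorted l id) x = l.countP (fun s => decide (s < x)) := by
  rw [bisectLeft_countP _ _ (by simpa using PySem.List.sorted_pairwise l id)]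
  exact List.Perm.countP_eq _ (PySem.List.sorted_perm l id false)

lemma bisectRight_sorted_countP (l : List Int) (x : Int) :
    PySem.List.bisectRight (PySem.List.sorted l id) x = l.countP (fun s => decide (s ≤ x)) := by
  rw [bisectRight_countP _ _ (by simpa using PySem.List.sorted_pairwise l id)]
  exact List.Perm.countP_eq _ (PySem.List.sorted_perm l id false)

-- the pointwise agreement of the two removal tests
lemma removal_tests_agree (B : List (List Int)) (a b : Int) :
    B.any (fun J => decide ((PySem.List.pyGetD J 0 0 < a ∧ a < PySem.List.pyGetD J 1 0) ∨
        (a ≤ PySem.List.pyGetD J 0 0 ∧ PySem.List.pyGetD J 0 0 < b)))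
      = (decide (PySem.List.bisectLeft (PySem.List.sorted (B.map (fun J => PySem.List.pyGetD J 0 0)) id) a <
            PySem.List.bisectLeft (PySem.List.sorted (B.map (fun J => PySem.List.pyGetD J 0 0)) id) b) ||
         decide (PySem.List.bisectRight (PySem.List.sorted ((B.filter (fun J => PySem.List.pyGetD J 0 0 < PySem.List.pyGetD J 1 0)).map (fun J => PySem.List.pyGetD J 1 0)) id) a <
            PySem.List.bisectLeft (PySem.List.sorted ((B.filter (fun J => PySem.List.pyGetD J 0 0 < PySem.List.pyGetD J 1 0)).map (fun J => PySem.List.pyGetD J 0 0)) id) a)) := by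
  rw [Bool.eq_iff_iff]
  simp only [List.any_eq_true, decide_eq_true_eq, Bool.or_eq_true,
    bisectLeft_sorted_countP, bisectRight_sorted_countP, List.countP_map]
  have hcond1 : (List.countP ((fun s => decide (s < a)) ∘ fun J => PySem.List.pyGetD J 0 0) B <
        List.countP ((fun s => decide (s < b)) ∘ fun J => PySem.List.pyGetD J 0 0) B)
      ↔ ∃ J ∈ B, a ≤ PySem.List.pyGetD J 0 0 ∧ PySem.List.pyGetD J 0 0 < b := by
    by_cases hab : a ≤ b
    · rw [countP_lt_countP_iff _ _ _ (by intro x _ hx; simp only [Function.comp] at *; simp at hx ⊢; omega)]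
      constructor
      · rintro ⟨J, hJ, h1, h2⟩; simp only [Function.comp] at h1 h2; simp at h1 h2; exact ⟨J, hJ, by omega, by omega⟩
      · rintro ⟨J, hJ, h1, h2⟩; exact ⟨J, hJ, by simp [Function.comp]; omega, by simp [Function.comp]; omega⟩
    · have : List.countP ((fun s => decide (s < b)) ∘ fun J => PySem.List.pyGetD J 0 0) B ≤
          List.countP ((fun s => decide (s < a)) ∘ fun J => PySem.List.pyGetD J 0 0) B :=
        List.countP_mono_left (by intro x _ hx; simp only [Function.comp] at *; simp at hx ⊢; omega)
      constructor
      · intro h; omega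
      · rintro ⟨J, _, h1, h2⟩; omega
  have hcond2 : (List.countP ((fun s => decide (s ≤ a)) ∘ fun J => PySem.List.pyGetD J 1 0)
          (B.filter (fun J => PySem.List.pyGetD J 0 0 < PySem.List.pyGetD J 1 0)) <
        List.countP ((fun s => decide (s < a)) ∘ fun J => PySem.List.pyGetD J 0 0)
          (B.filter (fun J => PySem.List.pyGetD J 0 0 < PySem.List.pyGetD J 1 0)))
      ↔ ∃ J ∈ B, PySem.List.pyGetD J 0 0 < a ∧ a < PySem.List.pyGetD J 1 0 := by
    rw [countP_lt_countP_iff _ _ _ (by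
      intro x hx h1
      have := List.of_mem_filter hx
      simp only [Function.comp] at *; simp at h1 this ⊢; omega)]
    constructor
    · rintro ⟨J, hJ, h1, h2⟩
      have := List.of_mem_filter hJ
      simp only [Function.comp] at h1 h2; simp at h1 h2 this
      exact ⟨J, List.mem_of_mem_filter hJ, by omega, by omega⟩
    · rintro ⟨J, hJ, h1, h2⟩
      refine ⟨J, List.mem_filter.mpr ⟨hJ, by simp; omega⟩, ?_, ?_⟩
      · simp [Function.comp]; omega
      · simp [Function.comp]; omega
  rw [hcond1, hcond2]
  constructor
  · rintro ⟨J, hJ, h | h⟩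
    · exact Or.inr ⟨J, hJ, h⟩
    · exact Or.inl ⟨J, hJ, h⟩
  · rintro (⟨J, hJ, h⟩ | ⟨J, hJ, h⟩)
    · exact ⟨J, hJ, Or.inr h⟩
    · exact ⟨J, hJ, Or.inl h⟩

-- ===== VERDICT (by name: the statement is the Claim_ definition above) =====
theorem excludingco_spec : Claim_equal_excludingco := by
  intro A B _hDom _hPre
  unfold Spec_excludingco
  by_cases hB : B = []
  · subst hB
    rw [excludingco_eq_filter]
    simp [excludingco_alt]
  · rw [excludingco_eq_filter, excludingco_alt_eq_filter A B hB]
    apply List.filter_congr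
    intro I _
    simp only [is_inter_eq, removal_tests_agree]
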